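-- pv_equiv track=rewrite | github.com/nuetzliches/powerbrain | pb-proxy/proxy.py | _parse_prom_labels
-- ===== SOURCE A (Python) =====
-- def _parse_prom_labels(key: str) -> dict[str, str]:
--     if "{" not in key:
--         return {}
--     label_str = key.split("{", 1)[1].rstrip("}")
--     labels = {}
--     for part in label_str.split(","):
--         if "=" in part:
--             k, v = part.split("=", 1)
--             labels[k] = v
--     return labels
-- ===== SOURCE B (Python) =====
-- def _parse_prom_labels(key: str) -> dict[str, str]:
--     if "{" not in key:
--         return {}
--     labels = {}
--     k, v = "", None
--     for c in key.split("{", 1)[1].rstrip("}"):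
--         if c == ",":
--             if v is not None:
--                 labels[k] = v
--             k, v = "", None
--         elif c == "=" and v is None:
--             v = ""
--         elif v is None:
--             k += c
--         else:
--             v += c
--     if v is not None:
--         labels[k] = v
--     return labels
-- ===== Notes on version B (the rewrite author's own statement) =====
-- stated objective: alternative
-- what changed: A splits the label string on commas and then, per piece, tests membership of the equals sign and splits once more; B makes a single left-to-right character pass with a key-buffer/value-buffer state machine and performs no label splitting at all.
import Mathlib
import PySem

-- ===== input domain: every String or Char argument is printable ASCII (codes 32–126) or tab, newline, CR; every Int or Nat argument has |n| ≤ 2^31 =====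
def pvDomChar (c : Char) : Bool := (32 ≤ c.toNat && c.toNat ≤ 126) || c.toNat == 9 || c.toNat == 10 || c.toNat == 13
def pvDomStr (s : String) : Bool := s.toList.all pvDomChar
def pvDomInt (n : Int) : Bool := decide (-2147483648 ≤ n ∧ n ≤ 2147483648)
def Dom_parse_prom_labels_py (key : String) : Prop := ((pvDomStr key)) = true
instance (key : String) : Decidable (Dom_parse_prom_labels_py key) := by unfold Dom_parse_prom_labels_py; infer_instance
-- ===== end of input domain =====

-- B replaces A's three-fold split machinery (split(","), "=" membership test, split("=",1))
-- by a single left-to-right character pass with a (key-buffer, value-buffer) state machine;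
-- objective: alternative (same cost, genuinely different traversal).


-- ===== PORT A =====
-- per-segment body of A's 'for part in label_str.split(","):' loop
def pvAStep (d : PySem.Dict String String) (part : List Char) : PySem.Dict String String :=
  if PySem.Chars.isIn ['='] part then
    -- k, v = part.split("=", 1)  ("=" is in part, so exactly two pieces)
    let kv := (PySem.Chars.splitMax? part ['='] 1).getD []
    d.insert (String.ofList (kv.getD 0 [])) (String.ofList (kv.getD 1 []))
  else d

def parse_prom_labels_py (key : String) : List (String × String) :=
  let cs := key.toList
  if PySem.Chars.isIn ['{'] cs then
    -- label_str = key.split("{", 1)[1].rstrip("}")   ([1] is in range since "{" in key;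
    -- rstrip("}") for the single-char strip set is exactly: drop trailing '}' characters)
    let labelStr := ((PySem.Chars.splitMax? cs ['{'] 1).getD []).getD 1 []
    let ls := (labelStr.reverse.dropWhile (fun c => c == '}')).reverse
    ((PySem.Chars.splitOn ls [',']).foldl pvAStep PySem.Dict.empty).items
  else []

-- ===== PORT B =====
-- labels[k] = v when a value buffer is open (v is not None), else nothing
def pvBFlush (st : PySem.Dict String String × List Char × Option (List Char)) :
    PySem.Dict String String :=
  match st with
  | (d, _k, none) => d
  | (d, k, some vb) => d.insert (String.ofList k) (String.ofList vb)

-- the body of B's 'for c in …' loop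
def pvBStep (st : PySem.Dict String String × List Char × Option (List Char)) (c : Char) :
    PySem.Dict String String × List Char × Option (List Char) :=
  match st with
  | (d, k, v) =>
    if c = ',' then (pvBFlush (d, k, v), ([], none))
    else if c = '=' ∧ v = none then (d, (k, some []))
    else match v with
      | none => (d, (k ++ [c], none))
      | some vb => (d, (k, some (vb ++ [c])))

def parse_prom_labels_py_alt (key : String) : List (String × String) :=
  let cs := key.toList
  if PySem.Chars.isIn ['{'] cs then
    -- same guard and same 'key.split("{",1)[1].rstrip("}")' prefix as Source B
    let labelStr := ((PySem.Chars.splitMax? cs ['{'] 1).getD []).getD 1 []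
    let ls := (labelStr.reverse.dropWhile (fun c => c == '}')).reverse
    (pvBFlush (ls.foldl pvBStep (PySem.Dict.empty, ([], none)))).items
  else []

-- ===== PRECONDITION & SPEC =====
def Spec_parse_prom_labels_py (key : String) (out : List (String × String)) : Prop := out = parse_prom_labels_py_alt key
instance (key : String) (out : List (String × String)) : Decidable (Spec_parse_prom_labels_py key out) := by unfold Spec_parse_prom_labels_py; infer_instance

-- ===== CLAIM (what is proved, stated in full; the proofs are below) =====
def Claim_equal_parse_prom_labels_py : Prop := ∀ (key : String), Dom_parse_prom_labels_py key → Spec_parse_prom_labels_py key (parse_prom_labels_py key)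

-- ===== LEMMAS AND PROOFS =====

-- reference single-char splitter: (current piece, remaining pieces)
def pvSplitC (c : Char) : List Char → List Char × List (List Char)
  | [] => ([], [])
  | x :: r =>
    let p := pvSplitC c r
    if x = c then ([], p.1 :: p.2) else (x :: p.1, p.2)

theorem pvSplitC_of_not_mem (c : Char) (l : List Char) (h : c ∉ l) :
    pvSplitC c l = (l, []) := by
  induction l with
  | nil => rfl
  | cons x r ih =>
    simp only [List.mem_cons, not_or] at h
    simp [pvSplitC, ih h.2, Ne.symm h.1]

theorem pvSplitC_cross (c : Char) (a rest : List Char) (h : c ∉ a) :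
    pvSplitC c (a ++ c :: rest) = (a, (pvSplitC c rest).1 :: (pvSplitC c rest).2) := by
  induction a with
  | nil => simp [pvSplitC]
  | cons x t ih =>
    simp only [List.mem_cons, not_or] at h
    simp [pvSplitC, ih h.2, Ne.symm h.1]

theorem pvGo_eq (c : Char) (l : List Char) :
    ∀ (fuel : Nat) (cur : List Char) (acc : List (List Char)), l.length < fuel →
    PySem.Chars.splitOn.go [c] fuel l cur acc
      = acc.reverse ++ (cur.reverse ++ (pvSplitC c l).1) :: (pvSplitC c l).2 := by
  induction l with
  | nil =>
    intro fuel cur acc h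
    match fuel with
    | f + 1 => simp [PySem.Chars.splitOn.go, pvSplitC]
  | cons x r ih =>
    intro fuel cur acc h
    match fuel with
    | f + 1 =>
      by_cases hx : x = c
      · subst hx
        simp only [PySem.Chars.splitOn.go, List.isPrefixOf, BEq.rfl, Bool.true_and, if_pos]
        rw [show List.drop [x].length (x :: r) = r from rfl]
        rw [ih f [] (cur.reverse :: acc) (by simpa using h)]
        simp [pvSplitC]
      · have hpre : [c].isPrefixOf (x :: r) = false := by
          simp [List.isPrefixOf]; exact fun hh => (hx hh.symm).elim
        simp only [PySem.Chars.splitOn.go, hpre, Bool.false_eq_true, if_false]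
        rw [ih f (x :: cur) acc (by simpa using h)]
        simp [pvSplitC, hx]

theorem pvSplitOn_eq (c : Char) (l : List Char) :
    PySem.Chars.splitOn l [c] = (pvSplitC c l).1 :: (pvSplitC c l).2 := by
  unfold PySem.Chars.splitOn
  rw [pvGo_eq c l (l.length + 1) [] [] (by omega)]
  simp

theorem pvGoMax_zero (sep l cur : List Char) (acc : List (List Char)) (fuel : Nat)
    (h : 0 < fuel) :
    PySem.Chars.splitOnMax.go sep fuel 0 l cur acc = ((cur.reverse ++ l) :: acc).reverse := by
  match fuel with
  | f + 1 =>
    match l with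
    | [] => simp [PySem.Chars.splitOnMax.go]
    | x :: r => simp [PySem.Chars.splitOnMax.go]

theorem pvGoMax_one (kb : List Char) :
    ∀ (fuel : Nat) (rest cur : List Char) (acc : List (List Char)), ('=' : Char) ∉ kb →
    kb.length + rest.length + 1 < fuel →
    PySem.Chars.splitOnMax.go ['='] fuel 1 (kb ++ '=' :: rest) cur acc
      = acc.reverse ++ [cur.reverse ++ kb, rest] := by
  induction kb with
  | nil =>
    intro fuel rest cur acc _ h
    match fuel with
    | f + 1 =>
      simp only [List.nil_append, PySem.Chars.splitOnMax.go, List.isPrefixOf, BEq.rfl,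
        Bool.true_and, reduceIte]
      rw [show (1 : Nat) - 1 = 0 from rfl,
        show List.drop ['='].length ('=' :: rest) = rest from rfl]
      rw [pvGoMax_zero ['='] rest [] (cur.reverse :: acc) f (by omega)]
      simp
  | cons x t ih =>
    intro fuel rest cur acc hk h
    simp only [List.mem_cons, not_or] at hk
    match fuel with
    | f + 1 =>
      have hpre : ['='].isPrefixOf (x :: (t ++ '=' :: rest)) = false := by
        simp [List.isPrefixOf]
        exact hk.1
      simp only [List.cons_append, PySem.Chars.splitOnMax.go, hpre, Bool.false_eq_true,
        if_false, if_neg (by omega : ¬ (1 : Nat) = 0)]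
      rw [ih f rest (x :: cur) acc hk.2 (by simp at h ⊢; omega)]
      simp

theorem pvSplitMaxEq (kb rest : List Char) (h : ('=' : Char) ∉ kb) :
    PySem.Chars.splitMax? (kb ++ '=' :: rest) ['='] 1 = some [kb, rest] := by
  unfold PySem.Chars.splitMax? PySem.Chars.splitOnMax
  rw [if_neg (by simp), if_neg (by omega)]
  rw [show ((1 : Int)).toNat = 1 from rfl]
  rw [pvGoMax_one kb ((kb ++ '=' :: rest).length + 1) rest [] [] h (by simp)]
  simp

theorem pvInfix_singleton (c : Char) (l : List Char) : [c] <:+: l ↔ c ∈ l := by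
  constructor
  · intro h; exact List.singleton_sublist.mp h.sublist
  · intro h
    obtain ⟨s, t, rfl⟩ := List.append_of_mem h
    exact ⟨s, t, by simp⟩

theorem pvIsIn_false (c : Char) (l : List Char) (h : c ∉ l) :
    PySem.Chars.isIn [c] l = false := by
  rw [PySem.Chars.isIn_eq_false_iff, pvInfix_singleton]; exact h

theorem pvIsIn_true (c : Char) (l : List Char) (h : c ∈ l) :
    PySem.Chars.isIn [c] l = true := by
  rw [PySem.Chars.isIn_iff_infix, pvInfix_singleton]; exact h

-- A's step on a segment with no '=' does nothing
theorem pvAStep_no_eq (d : PySem.Dict String String) (part : List Char)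
    (h : ('=' : Char) ∉ part) : pvAStep d part = d := by
  simp [pvAStep, pvIsIn_false _ _ h]

-- A's step on kb ++ '=' :: vb with '=' ∉ kb inserts (kb, vb)
theorem pvAStep_eq (d : PySem.Dict String String) (kb vb : List Char)
    (h : ('=' : Char) ∉ kb) :
    pvAStep d (kb ++ '=' :: vb) = d.insert (String.ofList kb) (String.ofList vb) := by
  have hm : ('=' : Char) ∈ kb ++ '=' :: vb := by simp
  simp [pvAStep, pvIsIn_true _ _ hm, pvSplitMaxEq kb vb h]

-- how B's loop body acts on each kind of character (by computation)
theorem pvStep_comma (d : PySem.Dict String String) (k : List Char)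
    (v : Option (List Char)) :
    pvBStep (d, (k, v)) ',' = (pvBFlush (d, (k, v)), ([], none)) := by
  simp [pvBStep]

theorem pvStep_eq (d : PySem.Dict String String) (k : List Char) :
    pvBStep (d, (k, none)) '=' = (d, (k, some [])) := by
  simp [pvBStep]

theorem pvStep_key (d : PySem.Dict String String) (k : List Char) (c : Char)
    (hc : ¬ c = ',') (he : ¬ c = '=') :
    pvBStep (d, (k, none)) c = (d, (k ++ [c], none)) := by
  simp [pvBStep, hc, he]

theorem pvStep_val (d : PySem.Dict String String) (k vb : List Char) (c : Char)
    (hc : ¬ c = ',') :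
    pvBStep (d, (k, some vb)) c = (d, (k, some (vb ++ [c]))) := by
  simp [pvBStep, hc]

-- the open segment represented by B's state
def pvSeg (v : Option (List Char)) : List Char :=
  match v with
  | none => []
  | some vb => '=' :: vb

-- MAIN INVARIANT: running B's machine over ls from state (d, k, v) and flushing
-- equals running A's per-segment fold over the comma split of k ++ pvSeg v ++ ls.
theorem pvMain (ls : List Char) :
    ∀ (d : PySem.Dict String String) (k : List Char) (v : Option (List Char)),
    ('=' : Char) ∉ k → (',' : Char) ∉ k → (∀ vb, v = some vb → (',' : Char) ∉ vb) →
    pvBFlush (ls.foldl pvBStep (d, (k, v)))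
      = ((pvSplitC ',' (k ++ pvSeg v ++ ls)).1 :: (pvSplitC ',' (k ++ pvSeg v ++ ls)).2).foldl
          pvAStep d := by
  induction ls with
  | nil =>
    intro d k v hk1 hk2 hv
    match v with
    | none =>
      simp only [List.foldl_nil, pvBFlush, pvSeg, List.append_nil]
      rw [pvSplitC_of_not_mem ',' k hk2]
      simp [pvAStep_no_eq d k hk1]
    | some vb =>
      have hnc : (',' : Char) ∉ k ++ '=' :: vb := by
        simp [hk2, hv vb rfl]
      simp only [List.foldl_nil, pvBFlush, pvSeg, List.append_nil]
      rw [pvSplitC_of_not_mem ',' _ hnc]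
      simp [pvAStep_eq d k vb hk1]
  | cons c ls ih =>
    intro d k v hk1 hk2 hv
    by_cases hc : c = ','
    · subst hc
      match v with
      | none =>
        rw [List.foldl_cons, pvStep_comma, show pvBFlush (d, (k, none)) = d from rfl]
        rw [ih d [] none (by simp) (by simp) (by simp)]
        have hsp : pvSplitC ',' (k ++ pvSeg none ++ ',' :: ls)
            = (k, (pvSplitC ',' ls).1 :: (pvSplitC ',' ls).2) := by
          simpa [pvSeg] using pvSplitC_cross ',' k ls hk2
        rw [hsp]
        simp [pvSeg, pvAStep_no_eq d k hk1]
      | some vb =>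
        rw [List.foldl_cons, pvStep_comma, show pvBFlush (d, (k, some vb))
          = d.insert (String.ofList k) (String.ofList vb) from rfl]
        rw [ih _ [] none (by simp) (by simp) (by simp)]
        have hnc : (',' : Char) ∉ k ++ '=' :: vb := by
          simp [hk2, hv vb rfl]
        have hsp : pvSplitC ',' (k ++ pvSeg (some vb) ++ ',' :: ls)
            = (k ++ '=' :: vb, (pvSplitC ',' ls).1 :: (pvSplitC ',' ls).2) := by
          simpa [pvSeg] using pvSplitC_cross ',' (k ++ '=' :: vb) ls hnc
        rw [hsp]
        simp [pvSeg, pvAStep_eq d k vb hk1]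
    · match v with
      | none =>
        by_cases he : c = '='
        · subst he
          rw [List.foldl_cons, pvStep_eq, ih d k (some []) hk1 hk2 (by simp)]
          simp [pvSeg]
        · rw [List.foldl_cons, pvStep_key d k c hc he, ih d (k ++ [c]) none
            (by intro hm; rcases List.mem_append.mp hm with h1 | h1
                · exact hk1 h1
                · exact he (List.mem_singleton.mp h1).symm)
            (by intro hm; rcases List.mem_append.mp hm with h1 | h1
                · exact hk2 h1
                · exact hc (List.mem_singleton.mp h1).symm)
            (by simp)]
          simp [pvSeg]
      | some vb =>
        rw [List.foldl_cons, pvStep_val d k vb c hc, ih d k (some (vb ++ [c])) hk1 hk2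
          (by intro x hx; injection hx with hx; subst hx
              intro hm; rcases List.mem_append.mp hm with h1 | h1
              · exact hv vb rfl h1
              · exact hc (List.mem_singleton.mp h1).symm)]
        simp [pvSeg]

-- ===== VERDICT (by name: the statement is the Claim_ definition above) =====
theorem parse_prom_labels_py_spec : Claim_equal_parse_prom_labels_py := by
  intro key _
  unfold Spec_parse_prom_labels_py parse_prom_labels_py parse_prom_labels_py_alt
  by_cases hb : PySem.Chars.isIn ['{'] key.toList = true
  · simp only [hb, if_true]
    set ls := (((((PySem.Chars.splitMax? key.toList ['{'] 1).getD []).getD 1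
      []).reverse).dropWhile (fun c => c == '}')).reverse with hls
    rw [pvSplitOn_eq ',' ls]
    rw [pvMain ls PySem.Dict.empty [] none (by simp) (by simp) (by simp)]
    simp [pvSeg]
  · simp [hb]
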